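-- pv_equiv track=rewrite | github.com/jrima12/CS-115 | old/test1_Spr21.py | okSquaresRec
-- ===== SOURCE A (Python) =====
-- def okSquaresRec(nums):
--     '''same as okSquares, but implemented using recursion'''
--     if nums == []:
--         return []
--     else:
--         if nums[0] < 0:
--             return okSquaresRec(nums[1:])
--         else:
--             return [nums[0]**2]+ okSquaresRec(nums[1:])
-- ===== SOURCE B (Python) =====
-- def okSquaresRec(nums):
--     '''iterative accumulator loop instead of recursion on nums[1:]'''
--     result = []
--     for x in nums:
--         if x >= 0:
--             result.append(x ** 2)
--     return result
-- ===== Notes on version B (the rewrite author's own statement) =====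
-- stated objective: simpler
-- what changed: Replaced recursion on nums[1:] (which copies the tail at every step) by a single iterative pass with an accumulator list.
import Mathlib
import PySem

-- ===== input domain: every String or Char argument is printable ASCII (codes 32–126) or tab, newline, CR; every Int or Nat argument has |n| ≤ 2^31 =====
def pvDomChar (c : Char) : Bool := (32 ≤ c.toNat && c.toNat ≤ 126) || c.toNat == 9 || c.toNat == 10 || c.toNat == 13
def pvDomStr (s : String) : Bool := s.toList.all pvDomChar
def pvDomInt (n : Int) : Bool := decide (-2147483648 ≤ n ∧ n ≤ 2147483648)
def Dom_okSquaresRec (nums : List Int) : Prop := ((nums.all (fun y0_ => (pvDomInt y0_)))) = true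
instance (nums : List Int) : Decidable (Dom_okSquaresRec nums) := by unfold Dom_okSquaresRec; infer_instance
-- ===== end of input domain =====

-- B replaces A's recursion over nums[1:] with one iterative accumulator pass (return value identical).

-- ===== PORT A =====
def okSquaresRec (nums : List Int) : List Int :=
  match nums with
  | [] => []
  | x :: rest =>
    if x < 0 then okSquaresRec rest
    else (x ^ 2) :: okSquaresRec rest

-- ===== PORT B =====
def okSquaresRec_alt (nums : List Int) : List Int :=
  (nums.foldl (fun result x => if x ≥ 0 then result ++ [x ^ 2] else result) [])

-- ===== PRECONDITION & SPEC =====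
def Spec_okSquaresRec (nums : List Int) (out : List Int) : Prop := out = okSquaresRec_alt nums
instance (nums : List Int) (out : List Int) : Decidable (Spec_okSquaresRec nums out) := by unfold Spec_okSquaresRec; infer_instance

-- ===== CLAIM (what is proved, stated in full; the proofs are below) =====
def Claim_equal_okSquaresRec : Prop := ∀ (nums : List Int), Dom_okSquaresRec nums → Spec_okSquaresRec nums (okSquaresRec nums)

-- ===== LEMMAS AND PROOFS =====
theorem okSquaresRec_alt_acc (nums : List Int) (acc : List Int) :
    nums.foldl (fun result x => if x ≥ 0 then result ++ [x ^ 2] else result) acc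
      = acc ++ okSquaresRec nums := by
  induction nums generalizing acc with
  | nil => simp [okSquaresRec]
  | cons x rest ih =>
    simp only [List.foldl, okSquaresRec]
    by_cases h : x ≥ 0
    · rw [if_pos h, if_neg (by omega), ih]
      simp
    · rw [if_neg h, if_pos (by omega), ih]

-- ===== VERDICT (by name: the statement is the Claim_ definition above) =====
theorem okSquaresRec_spec : Claim_equal_okSquaresRec := by
  intro nums _
  unfold Spec_okSquaresRec okSquaresRec_alt
  rw [okSquaresRec_alt_acc]
  simp
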